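-- pv_equiv track=rewrite | github.com/MaDoedel/intra-operative-registration | scripts/prefilter.py | find_segmentation_indices
-- ===== SOURCE A (Python) =====
-- def find_segmentation_indices(segmentation, segmentation_count):
-- 	non_liver_count = 0
-- 	indices = []
-- 	for i in range(len(segmentation)):
-- 		if segmentation[i] != 0:
-- 			continue
--
-- 		non_liver_count += 1
-- 		if non_liver_count >= segmentation_count:
-- 			non_liver_count = 0
-- 			indices.append(i)
--
-- 	return indices
-- ===== SOURCE B (Python) =====
-- def find_segmentation_indices(segmentation, segmentation_count):
--     zeros = [i for i, v in enumerate(segmentation) if v == 0]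
--     if segmentation_count <= 1:
--         return zeros
--     out = []
--     while len(zeros) >= segmentation_count:
--         out.append(zeros[segmentation_count - 1])
--         zeros = zeros[segmentation_count:]
--     return out
-- ===== Notes on version B (the rewrite author's own statement) =====
-- stated objective: simpler
-- what changed: Replaces the stateful reset-counter pass with two stages: build the list of zero positions in one comprehension, then repeatedly peel blocks of segmentation_count off its front, keeping each full block's last element (all positions when segmentation_count <= 1, where the original's counter test is always true).
import Mathlib
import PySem

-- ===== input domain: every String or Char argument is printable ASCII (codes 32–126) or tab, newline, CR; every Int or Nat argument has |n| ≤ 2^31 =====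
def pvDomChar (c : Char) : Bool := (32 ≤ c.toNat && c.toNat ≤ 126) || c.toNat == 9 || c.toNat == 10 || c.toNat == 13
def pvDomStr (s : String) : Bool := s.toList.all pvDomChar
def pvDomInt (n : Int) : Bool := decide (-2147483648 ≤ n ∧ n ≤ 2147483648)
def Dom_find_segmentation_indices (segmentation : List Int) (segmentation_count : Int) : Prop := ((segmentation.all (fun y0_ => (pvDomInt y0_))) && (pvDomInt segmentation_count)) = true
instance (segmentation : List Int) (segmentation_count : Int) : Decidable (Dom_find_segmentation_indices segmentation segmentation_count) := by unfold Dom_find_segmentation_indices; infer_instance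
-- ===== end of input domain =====

-- B replaces A's stateful reset-counter pass with two stages: build the list of zero
-- positions, then repeatedly peel blocks of segmentation_count off its front, keeping
-- each full block's last element (all positions when segmentation_count <= 1): simpler decomposition.

-- ===== PORT A =====
def find_segmentation_indices (segmentation : List Int) (segmentation_count : Int) : List Int :=
  ((PySem.List.pyRange 0 (PySem.List.len segmentation) 1).foldl
    (fun st i =>
      if PySem.List.pyGetD segmentation i 0 ≠ 0 then st
      else
        let c := st.1 + 1
        if c ≥ segmentation_count then ((0 : Int), st.2 ++ [i]) else (c, st.2))
    ((0 : Int), ([] : List Int))).2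

-- ===== PORT B =====
-- B's while loop "append zeros[k-1]; zeros = zeros[k:]" as the obvious recursion on zeros;
-- the 2 ≤ k conjunct is a totality guard only (the caller reaches pvPick solely with 2 ≤ k).
def pvPick (k : Int) (zs : List Int) : List Int :=
  if h : 2 ≤ k ∧ k ≤ zs.length then
    PySem.List.pyGetD zs (k - 1) 0 :: pvPick k (PySem.List.slice zs (some k) none)
  else []
termination_by zs.length
decreasing_by
  rw [PySem.List.slice_from zs (by omega : (0:Int) ≤ k)]
  simp only [List.length_drop]
  omega

def find_segmentation_indices_alt (segmentation : List Int) (segmentation_count : Int) : List Int :=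
  let zeros := ((PySem.List.enumerate segmentation).filter (fun p => p.2 == 0)).map (fun p => p.1)
  if segmentation_count ≤ 1 then zeros
  else pvPick segmentation_count zeros

-- ===== PRECONDITION & SPEC =====
def Spec_find_segmentation_indices (segmentation : List Int) (segmentation_count : Int) (out : List Int) : Prop := out = find_segmentation_indices_alt segmentation segmentation_count
instance (segmentation : List Int) (segmentation_count : Int) (out : List Int) : Decidable (Spec_find_segmentation_indices segmentation segmentation_count out) := by unfold Spec_find_segmentation_indices; infer_instance

-- ===== CLAIM (what is proved, stated in full; the proofs are below) =====
def Claim_equal_find_segmentation_indices : Prop := ∀ (segmentation : List Int) (segmentation_count : Int), Dom_find_segmentation_indices segmentation segmentation_count → Spec_find_segmentation_indices segmentation segmentation_count (find_segmentation_indices segmentation segmentation_count)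

-- ===== LEMMAS AND PROOFS =====

-- A's loop body, on an (index, value) pair
def pvG (k : Int) (st : Int × List Int) (p : Int × Int) : Int × List Int :=
  if p.2 ≠ 0 then st
  else
    let c := st.1 + 1
    if c ≥ k then ((0 : Int), st.2 ++ [p.1]) else (c, st.2)

lemma A_eq_foldG (segmentation : List Int) (k : Int) :
    find_segmentation_indices segmentation k
      = ((PySem.List.enumerate segmentation).foldl (pvG k) ((0 : Int), ([] : List Int))).2 := by
  rw [show PySem.List.enumerate segmentation
        = (PySem.List.pyRange 0 (PySem.List.len segmentation) 1).map
            (fun j => (j, PySem.List.pyGetD segmentation j 0))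
      from PySem.List.enumerate_eq_map_pyRange segmentation 0, List.foldl_map]
  rfl

-- k ≤ 1: the counter test is always true, every zero index is appended
lemma loop_all (k : Int) (hk : k ≤ 1) :
    ∀ (l : List (Int × Int)) (acc : List Int),
      (l.foldl (pvG k) ((0 : Int), acc)).2
        = acc ++ (l.filter (fun p => p.2 == 0)).map (fun p => p.1) := by
  intro l
  induction l with
  | nil => intro acc; simp
  | cons hd t ih =>
    intro acc
    by_cases hv : hd.2 = 0
    · have hstep : pvG k (0, acc) hd = (0, acc ++ [hd.1]) := by
        simp [pvG, hv]; omega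
      have hfil : (hd :: t).filter (fun p => p.2 == 0) = hd :: t.filter (fun p => p.2 == 0) := by
        simp [hv]
      rw [List.foldl_cons, hstep, hfil, List.map_cons, ih (acc ++ [hd.1])]
      simp
    · have hstep : pvG k (0, acc) hd = (0, acc) := by simp [pvG, hv]
      have hfil : (hd :: t).filter (fun p => p.2 == 0) = t.filter (fun p => p.2 == 0) := by
        simp [hv]
      rw [List.foldl_cons, hstep, hfil]
      exact ih acc

-- proof-only model of A's counting: emit an element whenever the counter hits k
def pvPickOff (k : Int) : Int → List Int → List Int
  | _, [] => []
  | c, z :: t => if c + 1 = k then z :: pvPickOff k 0 t else pvPickOff k (c + 1) t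

-- main invariant for k ≥ 2: A's fold from counter c is pvPickOff from c over the zero positions
lemma loop_main (k : Int) (hk : 2 ≤ k) :
    ∀ (l : List (Int × Int)) (c : Int) (acc : List Int), 0 ≤ c → c < k →
      (l.foldl (pvG k) (c, acc)).2
        = acc ++ pvPickOff k c ((l.filter (fun p => p.2 == 0)).map (fun p => p.1)) := by
  intro l
  induction l with
  | nil => intro c acc _ _; simp [pvPickOff]
  | cons hd t ih =>
    intro c acc hc0 hck
    by_cases hv : hd.2 = 0
    · have hfil : (hd :: t).filter (fun p => p.2 == 0) = hd :: t.filter (fun p => p.2 == 0) := by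
        simp [hv]
      rw [List.foldl_cons, hfil, List.map_cons]
      by_cases happ : c + 1 ≥ k
      · have hceq : c + 1 = k := by omega
        have hstep : pvG k (c, acc) hd = (0, acc ++ [hd.1]) := by simp [pvG, hv, happ]
        rw [hstep, ih 0 (acc ++ [hd.1]) le_rfl (by omega), pvPickOff, if_pos hceq]
        simp
      · have hstep : pvG k (c, acc) hd = (c + 1, acc) := by simp [pvG, hv, happ]
        rw [hstep, ih (c + 1) acc (by omega) (by omega), pvPickOff, if_neg (by omega)]
    · have hstep : pvG k (c, acc) hd = (c, acc) := by simp [pvG, hv]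
      have hfil : (hd :: t).filter (fun p => p.2 == 0) = t.filter (fun p => p.2 == 0) := by
        simp [hv]
      rw [List.foldl_cons, hstep, hfil]
      exact ih c acc hc0 hck

-- one unfolding of pvPick when 2 ≤ k
lemma pick_unfold (k : Int) (hk : 2 ≤ k) (zs : List Int) :
    pvPick k zs
      = if k ≤ (zs.length : Int) then
          PySem.List.pyGetD zs (k - 1) 0 :: pvPick k (PySem.List.slice zs (some k) none)
        else [] := by
  rw [pvPick]
  split_ifs with h1 h2 h2 <;> first | rfl | omega

-- pvPickOff from counter c equals the peel-off recursion shifted by c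
lemma pickOff_eq (k : Int) (hk : 2 ≤ k) :
    ∀ (n : Nat) (zs : List Int), zs.length ≤ n → ∀ (c : Int), 0 ≤ c → c < k →
      pvPickOff k c zs
        = if k ≤ c + (zs.length : Int) then
            PySem.List.pyGetD zs (k - 1 - c) 0 :: pvPick k (PySem.List.slice zs (some (k - c)) none)
          else [] := by
  intro n
  induction n with
  | zero =>
    intro zs hlen c hc0 hck
    have : zs = [] := List.eq_nil_of_length_eq_zero (by omega)
    subst this
    simp only [pvPickOff, List.length_nil, Nat.cast_zero]
    rw [if_neg (by omega : ¬ k ≤ c + (0:Int))]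
  | succ m ih =>
    intro zs hlen c hc0 hck
    match zs with
    | [] =>
      simp only [pvPickOff, List.length_nil, Nat.cast_zero]
      rw [if_neg (by omega : ¬ k ≤ c + (0:Int))]
    | z :: t =>
      simp only [List.length_cons] at hlen ⊢
      by_cases hc1 : c + 1 = k
      · -- emit z, then pvPickOff k 0 t = pvPick k t
        rw [pvPickOff, if_pos hc1]
        have ht : pvPickOff k 0 t
            = if k ≤ (t.length : Int) then
                PySem.List.pyGetD t (k - 1) 0 :: pvPick k (PySem.List.slice t (some k) none)
              else [] := by
          have := ih t (by omega) 0 le_rfl (by omega)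
          simpa using this
        rw [ht, ← pick_unfold k hk t]
        have hcond : k ≤ c + ((t.length + 1 : Nat) : Int) := by push_cast; omega
        rw [if_pos hcond]
        have hidx : PySem.List.pyGetD (z :: t) (k - 1 - c) 0 = z := by
          have : k - 1 - c = 0 := by omega
          rw [this]; exact PySem.List.pyGetD_zero_cons z t 0
        have hsl : PySem.List.slice (z :: t) (some (k - c)) none = t := by
          rw [PySem.List.slice_from _ (by omega : (0:Int) ≤ k - c)]
          have : (k - c).toNat = 1 := by omega
          rw [this, List.drop_succ_cons, List.drop_zero]
        rw [hidx, hsl]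
      · -- counter advances: step to t with counter c+1
        rw [pvPickOff, if_neg hc1, ih t (by omega) (c + 1) (by omega) (by omega)]
        have hcond : (k ≤ (c + 1) + (t.length : Int)) ↔ (k ≤ c + ((t.length + 1 : Nat) : Int)) := by
          push_cast; omega
        by_cases hle : k ≤ c + ((t.length + 1 : Nat) : Int)
        · rw [if_pos (hcond.mpr hle), if_pos hle]
          have hidx : PySem.List.pyGetD (z :: t) (k - 1 - c) 0
              = PySem.List.pyGetD t (k - 1 - (c + 1)) 0 := by
            rw [PySem.List.pyGetD_eq_getElem _ _ (by omega)
                  (by simp only [List.length_cons]; push_cast; omega),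
                PySem.List.pyGetD_eq_getElem _ _ (by omega) (by omega)]
            have h1 : (k - 1 - c).toNat = (k - 1 - (c + 1)).toNat + 1 := by omega
            simp [h1]
          have hsl : PySem.List.slice (z :: t) (some (k - c)) none
              = PySem.List.slice t (some (k - (c + 1))) none := by
            rw [PySem.List.slice_from _ (by omega : (0:Int) ≤ k - c),
                PySem.List.slice_from _ (by omega : (0:Int) ≤ k - (c + 1))]
            have h1 : (k - c).toNat = (k - (c + 1)).toNat + 1 := by omega
            rw [h1, List.drop_succ_cons]
          rw [hidx, hsl]
        · rw [if_neg ((not_iff_not.mpr hcond).mpr hle), if_neg hle]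

lemma pickOff_zero_eq_pick (k : Int) (hk : 2 ≤ k) (zs : List Int) :
    pvPickOff k 0 zs = pvPick k zs := by
  have := pickOff_eq k hk zs.length zs le_rfl 0 le_rfl (by omega)
  simpa [pick_unfold k hk zs] using this

-- ===== VERDICT (by name: the statement is the Claim_ definition above) =====
theorem find_segmentation_indices_spec : Claim_equal_find_segmentation_indices := by
  intro segmentation k _
  unfold Spec_find_segmentation_indices find_segmentation_indices_alt
  rw [A_eq_foldG]
  by_cases hk : k ≤ 1
  · rw [if_pos hk, loop_all k hk]
    simp
  · rw [if_neg hk, loop_main k (by omega) _ 0 [] le_rfl (by omega),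
        pickOff_zero_eq_pick k (by omega)]
    simp
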